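-- pv_equiv track=rewrite | github.com/abdallah1016126/TwitterSentimentAnalysis | 5- Django website/Sentiment/DjangoAPI/preprocess.py | bigramNegationWords
-- ===== SOURCE A (Python) =====
-- def bigramNegationWords(words, negationWords):
--     l = []
--     metNegation = False
--     bigram = ''
--     for w in words:
--         if w in negationWords:
--             if metNegation == False:
--                 bigram += 'not'
--                 metNegation = True
--             else:
--                 continue
--         else:
--             if metNegation == True:
--                 bigram += w
--                 l.append(bigram)
--                 metNegation = False
--                 bigram = ''
--             else:
--                 l.append(w)
--     return l
-- ===== SOURCE B (Python) =====
-- def bigramNegationWords(words, negationWords):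
--     l = []
--     i = 0
--     n = len(words)
--     while i < n:
--         if words[i] in negationWords:
--             j = i
--             while j < n and words[j] in negationWords:
--                 j += 1
--             if j < n:
--                 l.append('not' + words[j])
--                 i = j + 1
--             else:
--                 break
--         else:
--             l.append(words[i])
--             i += 1
--     return l
-- ===== Notes on version B (the rewrite author's own statement) =====
-- stated objective: alternative
-- what changed: Replaces the flag-and-accumulator state machine (metNegation/bigram carried across iterations) with an index-driven while loop that, on hitting a negation word, consumes the whole run of consecutive negations with an inner loop and directly emits 'not'+next word.
import Mathlib
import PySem

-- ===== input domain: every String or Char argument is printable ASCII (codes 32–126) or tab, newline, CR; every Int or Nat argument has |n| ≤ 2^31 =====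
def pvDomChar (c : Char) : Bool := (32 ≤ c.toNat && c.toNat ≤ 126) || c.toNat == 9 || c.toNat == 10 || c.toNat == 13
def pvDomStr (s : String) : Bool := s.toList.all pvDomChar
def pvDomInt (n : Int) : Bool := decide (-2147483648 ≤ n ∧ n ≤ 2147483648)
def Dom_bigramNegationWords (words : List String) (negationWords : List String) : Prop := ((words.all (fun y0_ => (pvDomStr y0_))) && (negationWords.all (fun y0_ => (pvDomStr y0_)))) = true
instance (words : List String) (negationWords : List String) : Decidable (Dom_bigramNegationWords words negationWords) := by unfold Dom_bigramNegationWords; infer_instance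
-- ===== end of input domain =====

-- B replaces A's flag/accumulator state machine by an index-driven loop with an
-- inner run-skipping loop; objective: alternative decomposition (same cost).

-- ===== PORT A =====
-- one loop iteration of A: state (l, metNegation, bigram)
def stepA (negationWords : List String) (st : List String × Bool × String) (w : String) :
    List String × Bool × String :=
  let (l, metNegation, bigram) := st
  if w ∈ negationWords then
    if metNegation = false then (l, true, bigram ++ "not") else (l, metNegation, bigram)
  else
    if metNegation = true then (l ++ [bigram ++ w], false, "") else (l ++ [w], metNegation, bigram)

def bigramNegationWords (words : List String) (negationWords : List String) : List String :=
  (words.foldl (stepA negationWords) ([], false, "")).1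

-- ===== PORT B =====
-- inner while loop: while j < n and words[j] in negationWords: j += 1
def skipRun (words negationWords : List String) (n j : Nat) : Nat :=
  if j < n ∧ words.getD j "" ∈ negationWords then skipRun words negationWords n (j + 1) else j
termination_by n - j
decreasing_by omega

theorem skipRun_ge (words negationWords : List String) (n j : Nat) :
    j ≤ skipRun words negationWords n j := by
  fun_induction skipRun <;> omega

-- outer while loop over index i with accumulator l
def altLoop (words negationWords : List String) (n i : Nat) (l : List String) : List String :=
  if i < n then
    let w := words.getD i ""
    if w ∈ negationWords then
      let j := skipRun words negationWords n i
      if j < n then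
        altLoop words negationWords n (j + 1) (l ++ ["not" ++ words.getD j ""])
      else l
    else altLoop words negationWords n (i + 1) (l ++ [w])
  else l
termination_by n - i
decreasing_by
  · have := skipRun_ge words negationWords n i; omega
  · omega

def bigramNegationWords_alt (words : List String) (negationWords : List String) : List String :=
  altLoop words negationWords words.length 0 []

-- ===== PRECONDITION & SPEC =====
def Spec_bigramNegationWords (words : List String) (negationWords : List String) (out : List String) : Prop := out = bigramNegationWords_alt words negationWords
instance (words : List String) (negationWords : List String) (out : List String) : Decidable (Spec_bigramNegationWords words negationWords out) := by unfold Spec_bigramNegationWords; infer_instance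

-- ===== CLAIM (what is proved, stated in full; the proofs are below) =====
def Claim_equal_bigramNegationWords : Prop := ∀ (words : List String) (negationWords : List String), Dom_bigramNegationWords words negationWords → Spec_bigramNegationWords words negationWords (bigramNegationWords words negationWords)

-- ===== LEMMAS AND PROOFS =====

-- reference functions: result of the rest of the scan with metNegation = false / true
mutual
def specF (negationWords : List String) : List String → List String
  | [] => []
  | w :: ws => if w ∈ negationWords then specT negationWords ws else w :: specF negationWords ws
def specT (negationWords : List String) : List String → List String
  | [] => []
  | w :: ws =>
    if w ∈ negationWords then specT negationWords ws
    else ("not" ++ w) :: specF negationWords ws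
end

theorem foldA_inv (negationWords : List String) (rest : List String) :
    ∀ l : List String,
      (rest.foldl (stepA negationWords) (l, false, "")).1 = l ++ specF negationWords rest ∧
      (rest.foldl (stepA negationWords) (l, true, "not")).1 = l ++ specT negationWords rest := by
  induction rest with
  | nil => intro l; simp [specF, specT]
  | cons w ws ih =>
    intro l
    by_cases hw : w ∈ negationWords
    · have hnot : ("" : String) ++ "not" = "not" := by decide
      simp [stepA, hw, specF, specT, hnot, ih l]
    · constructor
      · simpa [stepA, hw, specF] using (ih (l ++ [w])).1
      · simpa [stepA, hw, specT] using (ih (l ++ ["not" ++ w])).1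

theorem specT_drop (words negationWords : List String) (n : Nat) (hn : n = words.length) :
    ∀ j, j ≤ n →
      specT negationWords (words.drop j) =
        (if skipRun words negationWords n j < n then
          ("not" ++ words.getD (skipRun words negationWords n j) "") ::
            specF negationWords (words.drop (skipRun words negationWords n j + 1))
        else []) := by
  intro j hj
  fun_induction skipRun words negationWords n j with
  | case1 j h ih =>
    obtain ⟨hjn, hmem⟩ := h
    have hjl : j < words.length := hn ▸ hjn
    have hd : words.drop j = words.getD j "" :: words.drop (j + 1) := by
      rw [List.getD_eq_getElem _ _ hjl, List.drop_eq_getElem_cons hjl]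
    rw [hd, specT, if_pos hmem]
    exact ih (by omega)
  | case2 j h =>
    by_cases hjn : j < n
    · have hmem : words.getD j "" ∉ negationWords := by tauto
      have hjl : j < words.length := hn ▸ hjn
      have hd : words.drop j = words.getD j "" :: words.drop (j + 1) := by
        rw [List.getD_eq_getElem _ _ hjl, List.drop_eq_getElem_cons hjl]
      rw [hd, specT, if_neg hmem, if_pos hjn]
    · have hje : j = n := by omega
      rw [hje, hn, List.drop_length]
      simp [specT]

theorem altLoop_eq (words negationWords : List String) (n : Nat) (hn : n = words.length) :
    ∀ i l, i ≤ n →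
      altLoop words negationWords n i l = l ++ specF negationWords (words.drop i) := by
  intro i l hi
  fun_induction altLoop words negationWords n i l with
  | case1 i l hin w hw j hjn ih =>
    -- negation word at i, run ends at j < n
    have hil : i < words.length := hn ▸ hin
    have hd : words.drop i = words.getD i "" :: words.drop (i + 1) := by
      rw [List.getD_eq_getElem _ _ hil, List.drop_eq_getElem_cons hil]
    have hskip : skipRun words negationWords n i = skipRun words negationWords n (i + 1) := by
      rw [skipRun, if_pos ⟨hin, hw⟩]
    have hT := specT_drop words negationWords n hn (i + 1) (by omega)
    rw [hd, specF, if_pos hw, hT, ← hskip]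
    have hjn' : j < n := hjn
    rw [if_pos hjn']
    have := ih (by omega)
    rw [this]; simp
    exact ⟨rfl, rfl⟩
  | case2 i l hin w hw j hjn =>
    -- negation word at i, run reaches the end: trailing negations dropped
    have hil : i < words.length := hn ▸ hin
    have hd : words.drop i = words.getD i "" :: words.drop (i + 1) := by
      rw [List.getD_eq_getElem _ _ hil, List.drop_eq_getElem_cons hil]
    have hskip : skipRun words negationWords n i = skipRun words negationWords n (i + 1) := by
      rw [skipRun, if_pos ⟨hin, hw⟩]
    have hT := specT_drop words negationWords n hn (i + 1) (by omega)
    rw [hd, specF, if_pos hw, hT, ← hskip, if_neg hjn]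
    simp
  | case3 i l hin w hw ih =>
    -- ordinary word at i
    have hil : i < words.length := hn ▸ hin
    have hd : words.drop i = words.getD i "" :: words.drop (i + 1) := by
      rw [List.getD_eq_getElem _ _ hil, List.drop_eq_getElem_cons hil]
    rw [hd, specF, if_neg hw, ih (by omega)]
    simp only [List.append_assoc, List.singleton_append]
    rfl
  | case4 i l hin =>
    have hie : i = n := by omega
    rw [hie, hn, List.drop_length]
    simp [specF]

-- ===== VERDICT (by name: the statement is the Claim_ definition above) =====
theorem bigramNegationWords_spec : Claim_equal_bigramNegationWords := by
  intro words negationWords _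
  unfold Spec_bigramNegationWords bigramNegationWords bigramNegationWords_alt
  rw [(foldA_inv negationWords words []).1,
      altLoop_eq words negationWords words.length rfl 0 [] (by omega)]
  simp
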